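-- pv_equiv track=rewrite | github.com/elanzuo/NeepWords | src/neepwordextractor/cleaner.py | expand_variants
-- ===== SOURCE A (Python) =====
-- def expand_variants(line: str) -> list[str]:
--     """Expand slash and parentheses variants into individual word entries."""
--     parts = [part.strip() for part in line.split(" / ") if part.strip()]
--     variants: list[str] = []
--     seen: set[str] = set()
--     for part in parts:
--         for expanded in _expand_parentheses(part):
--             if expanded and expanded not in seen:
--                 variants.append(expanded)
--                 seen.add(expanded)
--     if not variants:
--         return variants
--     variant_set = set(variants)
--     return [
--         variant
--         for variant in variants
--         if not (variant.endswith("ou") and f"{variant}r" in variant_set)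
--     ]
--
-- def _expand_parentheses(word: str) -> list[str]:
--     start = word.find("(")
--     if start == -1:
--         return [word]
--     end = word.find(")", start + 1)
--     if end == -1:
--         return [word.replace("(", "").replace(")", "")]
--     prefix = word[:start]
--     optional = word[start + 1 : end]
--     suffix = word[end + 1 :]
--     without_optional = f"{prefix}{suffix}"
--     if not optional:
--         return [without_optional]
--     with_optional = f"{prefix}{optional}{suffix}"
--     expanded: list[str] = []
--     for candidate in (without_optional, with_optional):
--         expanded.extend(_expand_parentheses(candidate))
--     return expanded
-- ===== SOURCE B (Python) =====
-- def expand_variants(line: str) -> list[str]: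
--     """Expand slash and parentheses variants into individual word entries."""
--     expanded: list[str] = []
--     for raw in line.split(" / "):
--         part = raw.strip()
--         if part:
--             expanded.extend(_expand_paren_stack(part))
--     variants = list(dict.fromkeys(w for w in expanded if w))
--     return [
--         v
--         for v in variants
--         if not (v.endswith("ou") and f"{v}r" in variants)
--     ]
--
--
-- def _expand_paren_stack(word: str) -> list[str]:
--     """Iterative DFS: explicit stack of partially-expanded strings."""
--     out: list[str] = []
--     stack = [word]
--     while stack:
--         w = stack.pop()
--         start = w.find("(")
--         if start == -1:
--             out.append(w)
--             continue
--         end = w.find(")", start + 1)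
--         if end == -1:
--             out.append(w.replace("(", "").replace(")", ""))
--             continue
--         prefix = w[:start]
--         optional = w[start + 1 : end]
--         suffix = w[end + 1 :]
--         without_optional = prefix + suffix
--         if not optional:
--             out.append(without_optional)  # A's semantics: empty optional ends expansion
--             continue
--         stack.append(prefix + optional + suffix)  # expanded second
--         stack.append(without_optional)                # expanded first
--     return out
-- ===== Notes on version B (the rewrite author's own statement) =====
-- stated objective: alternative
-- what changed: The recursive parenthesis expansion becomes an explicit-stack DFS loop, and the append-if-unseen accumulator plus empty-list guard is replaced by one flat expansion list deduplicated with dict.fromkeys.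
import Mathlib
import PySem

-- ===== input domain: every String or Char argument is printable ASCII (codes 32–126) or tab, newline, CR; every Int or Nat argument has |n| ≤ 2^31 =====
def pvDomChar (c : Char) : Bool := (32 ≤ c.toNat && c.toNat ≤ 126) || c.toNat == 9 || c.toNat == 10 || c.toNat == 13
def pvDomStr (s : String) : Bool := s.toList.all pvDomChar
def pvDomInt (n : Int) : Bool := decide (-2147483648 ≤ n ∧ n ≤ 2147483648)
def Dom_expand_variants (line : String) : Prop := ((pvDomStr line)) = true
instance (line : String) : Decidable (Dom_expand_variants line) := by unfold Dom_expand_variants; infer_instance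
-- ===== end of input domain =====

-- B replaces A's recursive parenthesis expansion by an explicit-stack DFS loop, and A's
-- append-if-unseen accumulator by one flat expansion list deduplicated afterwards (same cost).

-- Shared termination lemma (cited by both ports' decreasing_by): when a '(' and a later ')'
-- are found, both the without-optional and the with-optional candidate are shorter than w.
theorem pvParen_lt (w : List Char)
    (h1 : ¬ PySem.Chars.find w ['('] = -1)
    (h2 : ¬ PySem.Chars.findFrom w [')'] (PySem.Chars.find w ['('] + 1) = -1) :
    (PySem.List.slice w none (some (PySem.Chars.find w ['('])) ++
      PySem.List.slice w (some (PySem.Chars.findFrom w [')'] (PySem.Chars.find w ['('] + 1) + 1)) none).length < w.length ∧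
    (PySem.List.slice w none (some (PySem.Chars.find w ['('])) ++
      PySem.List.slice w (some (PySem.Chars.find w ['('] + 1)) (some (PySem.Chars.findFrom w [')'] (PySem.Chars.find w ['('] + 1))) ++
      PySem.List.slice w (some (PySem.Chars.findFrom w [')'] (PySem.Chars.find w ['('] + 1) + 1)) none).length < w.length := by
  have hneg := PySem.Chars.neg_one_le_find w ['(']
  have hf0 : 0 ≤ PySem.Chars.find w ['('] := by omega
  obtain ⟨hpre, -⟩ := PySem.Chars.find_spec (s := w) (sub := ['(']) hf0
  obtain ⟨s, hs⟩ : ∃ s : ℕ, PySem.Chars.find w ['('] = (s : ℤ) :=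
    ⟨(PySem.Chars.find w ['(']).toNat, by omega⟩
  rw [hs] at h2 hpre ⊢
  simp only [Int.toNat_natCast] at hpre
  have hsl : s < w.length := by
    have hl := hpre.length_le
    simp [List.length_drop] at hl
    omega
  have hcast : (s : ℤ) + 1 = ((s + 1 : ℕ) : ℤ) := by push_cast; ring
  rw [hcast] at h2 ⊢
  have hk : s + 1 ≤ w.length := by omega
  obtain ⟨hle, hpr, -⟩ := PySem.Chars.findFrom_natCast_spec w [')'] (s + 1) hk h2
  obtain ⟨t, htt⟩ : ∃ t : ℕ, PySem.Chars.findFrom w [')'] ((s + 1 : ℕ) : ℤ) = (t : ℤ) :=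
    ⟨(PySem.Chars.findFrom w [')'] ((s + 1 : ℕ) : ℤ)).toNat, by omega⟩
  rw [htt] at hle hpr ⊢
  simp only [Int.toNat_natCast] at hpr
  have htl : t < w.length := by
    have hl := hpr.length_le
    simp [List.length_drop] at hl
    omega
  have hst : s + 1 ≤ t := by exact_mod_cast hle
  have g1 : PySem.List.slice w none (some ((s : ℕ) : ℤ)) = List.take s w := by
    rw [PySem.List.slice_to w (by positivity)]
    simp
  have g2 : PySem.List.slice w (some ((t : ℤ) + 1)) none = List.drop (t + 1) w := by
    rw [show ((t : ℤ) + 1) = ((t + 1 : ℕ) : ℤ) by push_cast; ring]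
    rw [PySem.List.slice_from w (by positivity)]
    simp
  have g3 : PySem.List.slice w (some ((s + 1 : ℕ) : ℤ)) (some ((t : ℕ) : ℤ))
      = List.take (t - (s + 1)) (List.drop (s + 1) w) := by
    rw [PySem.List.slice_toNat w (by positivity) (by positivity)]
    simp
  rw [g1, g2, g3]
  constructor <;> simp [List.length_append, List.length_take, List.length_drop] <;> omega

-- ===== PORT A =====
-- port of _expand_parentheses (A's recursive helper); strings handled as List Char
def pvExpandA (w : List Char) : List (List Char) :=
  let start := PySem.Chars.find w ['(']
  if h1 : start = -1 then [w]
  else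
    let e := PySem.Chars.findFrom w [')'] (start + 1)
    if h2 : e = -1 then
      [PySem.Chars.replace (PySem.Chars.replace w ['('] []) [')'] []]
    else
      let pre := PySem.List.slice w none (some start)
      let opt := PySem.List.slice w (some (start + 1)) (some e)
      let suf := PySem.List.slice w (some (e + 1)) none
      let without_optional := pre ++ suf
      if opt = [] then [without_optional]
      else pvExpandA without_optional ++ pvExpandA (pre ++ opt ++ suf)
termination_by w.length
decreasing_by
  · exact (pvParen_lt w h1 h2).1
  · exact (pvParen_lt w h1 h2).2

def expand_variants (line : String) : List String :=
  -- parts = [part.strip() for part in line.split(" / ") if part.strip()]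
  let parts := ((PySem.Chars.splitOn line.toList " / ".toList).map PySem.Chars.strip).filter (fun p => p ≠ [])
  -- the variants/seen accumulation loop
  let st := parts.foldl (fun (st : List (List Char) × PySem.Set (List Char)) part =>
      (pvExpandA part).foldl (fun st e =>
        if e ≠ [] ∧ PySem.Set.contains st.2 e = false then (st.1 ++ [e], PySem.Set.add st.2 e)
        else st) st)
    ([], PySem.Set.empty)
  let variants := st.1
  if variants = [] then []
  else
    let vset := PySem.Set.ofList variants
    (variants.filter (fun v =>
        !(PySem.Chars.endswith v "ou".toList && PySem.Set.contains vset (v ++ ['r'])))).map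
      (fun l => String.ofList l)

-- ===== PORT B =====
-- port of _expand_paren_stack: Python's stack top (list end, .pop/.append) is the list HEAD here
def pvStackExpand (stack : List (List Char)) (out : List (List Char)) : List (List Char) :=
  match stack with
  | [] => out
  | w :: rest =>
    let start := PySem.Chars.find w ['(']
    if h1 : start = -1 then pvStackExpand rest (out ++ [w])
    else
      let e := PySem.Chars.findFrom w [')'] (start + 1)
      if h2 : e = -1 then
        pvStackExpand rest (out ++ [PySem.Chars.replace (PySem.Chars.replace w ['('] []) [')'] []])
      else
        let pre := PySem.List.slice w none (some start)
        let opt := PySem.List.slice w (some (start + 1)) (some e)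
        let suf := PySem.List.slice w (some (e + 1)) none
        let without_optional := pre ++ suf
        if opt = [] then pvStackExpand rest (out ++ [without_optional])
        else pvStackExpand (without_optional :: (pre ++ opt ++ suf) :: rest) out
termination_by (stack.map (fun s => 3 ^ s.length)).sum
decreasing_by
  all_goals simp only [List.map_cons, List.sum_cons]
  all_goals try (have hp : 0 < 3 ^ w.length := pow_pos (by norm_num) _; omega)
  · have h := pvParen_lt w h1 h2
    have hd : 0 < 3 ^ (w.length - 1) := by positivity
    have e1 : 3 ^ (PySem.List.slice w none (some (PySem.Chars.find w ['('])) ++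
        PySem.List.slice w (some (PySem.Chars.findFrom w [')'] (PySem.Chars.find w ['('] + 1) + 1)) none).length
        ≤ 3 ^ (w.length - 1) := Nat.pow_le_pow_right (by norm_num) (by omega)
    have e2 : 3 ^ (PySem.List.slice w none (some (PySem.Chars.find w ['('])) ++
        PySem.List.slice w (some (PySem.Chars.find w ['('] + 1)) (some (PySem.Chars.findFrom w [')'] (PySem.Chars.find w ['('] + 1))) ++
        PySem.List.slice w (some (PySem.Chars.findFrom w [')'] (PySem.Chars.find w ['('] + 1) + 1)) none).length
        ≤ 3 ^ (w.length - 1) := Nat.pow_le_pow_right (by norm_num) (by omega)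
    have e5 : (3 : ℕ) ^ w.length = 3 * 3 ^ (w.length - 1) := by
      have e4 : w.length - 1 + 1 = w.length := by omega
      calc (3 : ℕ) ^ w.length = 3 ^ (w.length - 1 + 1) := by rw [e4]
        _ = 3 * 3 ^ (w.length - 1) := by rw [pow_succ]; ring
    omega

def expand_variants_alt (line : String) : List String :=
  let expanded := (PySem.Chars.splitOn line.toList " / ".toList).foldl
    (fun acc raw =>
      let part := PySem.Chars.strip raw
      if part ≠ [] then acc ++ pvStackExpand [part] [] else acc) []
  let variants := PySem.List.dedup (expanded.filter (fun w => w ≠ []))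
  (variants.filter (fun v =>
      !(PySem.Chars.endswith v "ou".toList && decide ((v ++ ['r']) ∈ variants)))).map
    (fun l => String.ofList l)

-- ===== PRECONDITION & SPEC =====
def Spec_expand_variants (line : String) (out : List String) : Prop := out = expand_variants_alt line
instance (line : String) (out : List String) : Decidable (Spec_expand_variants line out) := by unfold Spec_expand_variants; infer_instance

-- ===== CLAIM (what is proved, stated in full; the proofs are below) =====
def Claim_equal_expand_variants : Prop := ∀ (line : String), Dom_expand_variants line → Spec_expand_variants line (expand_variants line)

-- ===== LEMMAS AND PROOFS =====
-- the stack loop processes the top of the stack exactly like one recursive expansion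
theorem pvStack_cons (n : ℕ) : ∀ (w : List Char), w.length < n → ∀ rest out,
    pvStackExpand (w :: rest) out = pvStackExpand rest (out ++ pvExpandA w) := by
  induction n with
  | zero => intro w hw; omega
  | succ n ih =>
    intro w hw rest out
    conv_lhs => rw [pvStackExpand]
    conv_rhs => rw [pvExpandA]
    by_cases h1 : PySem.Chars.find w ['('] = -1
    · simp only [h1, eq_self_iff_true, dite_eq_ite, if_true]
    · simp only [h1, dite_eq_ite, if_false]
      by_cases h2 : PySem.Chars.findFrom w [')'] (PySem.Chars.find w ['('] + 1) = -1
      · simp only [h2, eq_self_iff_true, dite_eq_ite, if_true]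
      · simp only [h2, dite_eq_ite, if_false]
        by_cases h3 : PySem.List.slice w (some (PySem.Chars.find w ['('] + 1)) (some (PySem.Chars.findFrom w [')'] (PySem.Chars.find w ['('] + 1))) = []
        · simp only [h3, eq_self_iff_true, if_true]
        · simp only [h3, if_false]
          have hlt := pvParen_lt w h1 h2
          rw [ih _ (by omega) _ out, ih _ (by omega) rest _]
          rw [List.append_assoc]

theorem pvStack_single (w : List Char) : pvStackExpand [w] [] = pvExpandA w := by
  rw [pvStack_cons (w.length + 1) w (by omega)]
  simp [pvStackExpand]

-- a fold of folds is a fold over the flattened list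
theorem pvFoldFlat {α β γ : Type} (f : α → List γ) (G : β → γ → β) :
    ∀ (l : List α) (init : β),
      l.foldl (fun b a => (f a).foldl G b) init = (l.flatMap f).foldl G init := by
  intro l
  induction l with
  | nil => intro init; rfl
  | cons a l ih =>
    intro init
    simp only [List.foldl_cons, List.flatMap_cons, List.foldl_append]
    exact ih _

-- A's (variants, seen) pair stays diagonal and equals a Set.add fold over the nonempty items
theorem pvPairFold : ∀ (ys : List (List Char)) (acc : List (List Char)),
    ys.foldl (fun (st : List (List Char) × PySem.Set (List Char)) e =>
        if e ≠ [] ∧ PySem.Set.contains st.2 e = false then (st.1 ++ [e], PySem.Set.add st.2 e)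
        else st) (acc, acc)
      = ((ys.filter (fun w => w ≠ [])).foldl PySem.Set.add acc,
         (ys.filter (fun w => w ≠ [])).foldl PySem.Set.add acc) := by
  intro ys
  induction ys with
  | nil => intro acc; rfl
  | cons e ys ih =>
    intro acc
    rw [List.foldl_cons]
    show List.foldl _ (if e ≠ [] ∧ PySem.Set.contains acc e = false
        then (acc ++ [e], PySem.Set.add acc e)
        else ((acc, acc) : List (List Char) × PySem.Set (List Char))) ys = _
    by_cases he : e = []
    · rw [if_neg (fun hh => hh.1 he), List.filter_cons_of_neg (by simp [he])]
      exact ih acc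
    · rw [List.filter_cons_of_pos (by simp [he]), List.foldl_cons]
      have hstep : (if e ≠ [] ∧ PySem.Set.contains acc e = false then (acc ++ [e], PySem.Set.add acc e)
          else ((acc, acc) : List (List Char) × PySem.Set (List Char)))
          = (PySem.Set.add acc e, PySem.Set.add acc e) := by
        by_cases hc : PySem.Set.contains acc e = false
        · have hm : e ∉ acc := by
            intro h
            have h2 := (PySem.Set.contains_iff acc e).mpr h
            rw [h2] at hc
            simp at hc
          have hadd : PySem.Set.add acc e = acc ++ [e] := by simp [PySem.Set.add, hm]
          rw [if_pos ⟨he, hc⟩, hadd]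
        · have hc' : PySem.Set.contains acc e = true := by
            cases h : PySem.Set.contains acc e
            · exact absurd h hc
            · rfl
          have hm : e ∈ acc := (PySem.Set.contains_iff acc e).mp hc'
          have hadd : PySem.Set.add acc e = acc := by simp [PySem.Set.add, hm]
          rw [if_neg (fun hh => hc hh.2), hadd]
      rw [hstep]
      exact ih _

-- B's accumulation loop is the flattened expansion of the stripped nonempty parts
theorem pvBexpand : ∀ (l : List (List Char)) (acc : List (List Char)),
    l.foldl (fun acc raw =>
        let part := PySem.Chars.strip raw
        if part ≠ [] then acc ++ pvStackExpand [part] [] else acc) acc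
      = acc ++ ((l.map PySem.Chars.strip).filter (fun p => p ≠ [])).flatMap pvExpandA := by
  intro l
  induction l with
  | nil => intro acc; simp
  | cons a l ih =>
    intro acc
    rw [List.foldl_cons]
    show List.foldl _ (if PySem.Chars.strip a ≠ []
        then acc ++ pvStackExpand [PySem.Chars.strip a] [] else acc) l = _
    rw [List.map_cons]
    by_cases ha : PySem.Chars.strip a = []
    · rw [if_neg (fun hh => hh ha), List.filter_cons_of_neg (by simp [ha])]
      exact ih acc
    · rw [if_pos ha, List.filter_cons_of_pos (by simp [ha]), List.flatMap_cons,
        pvStack_single, ih _, List.append_assoc]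

-- Python's `x in set(v)` agrees with list membership
theorem pvContainsOfList (V : List (List Char)) (y : List Char) :
    PySem.Set.contains (PySem.Set.ofList V) y = decide (y ∈ V) := by
  by_cases h : y ∈ V
  · simp only [h, decide_true]
    exact (PySem.Set.contains_iff _ _).mpr ((PySem.Set.mem_ofList V y).mpr h)
  · simp only [h, decide_false]
    cases hc : PySem.Set.contains (PySem.Set.ofList V) y
    · rfl
    · exact absurd ((PySem.Set.mem_ofList V y).mp ((PySem.Set.contains_iff _ _).mp hc)) h

-- the trailing '-ou'/'-our' filter: A's empty-guard + set lookup equals B's dedup + list lookup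
theorem pvFinal (ys : List (List Char)) :
    (if (List.foldl PySem.Set.add [] (ys.filter (fun w => w ≠ []))) = [] then ([] : List String)
     else ((List.foldl PySem.Set.add [] (ys.filter (fun w => w ≠ []))).filter (fun v =>
        !(PySem.Chars.endswith v "ou".toList &&
          PySem.Set.contains (PySem.Set.ofList (List.foldl PySem.Set.add [] (ys.filter (fun w => w ≠ [])))) (v ++ ['r'])))).map
       (fun l => String.ofList l))
    = ((PySem.List.dedup (ys.filter (fun w => w ≠ []))).filter (fun v =>
        !(PySem.Chars.endswith v "ou".toList &&
          decide ((v ++ ['r']) ∈ PySem.List.dedup (ys.filter (fun w => w ≠ [])))))).map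
       (fun l => String.ofList l) := by
  have hdv : PySem.List.dedup (ys.filter (fun w => w ≠ []))
      = List.foldl PySem.Set.add [] (ys.filter (fun w => w ≠ [])) := by
    rw [PySem.List.dedup_eq_ofList, PySem.Set.ofList_eq_foldl]
  simp only [hdv]
  by_cases hx : List.foldl PySem.Set.add [] (ys.filter (fun w => w ≠ [])) = []
  · rw [if_pos hx, hx]
    simp
  · rw [if_neg hx]
    congr 1
    apply List.filter_congr
    intro v _
    simp only [pvContainsOfList]

-- ===== VERDICT (by name: the statement is the Claim_ definition above) =====
theorem expand_variants_spec : Claim_equal_expand_variants := by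
  intro line _
  unfold Spec_expand_variants expand_variants expand_variants_alt
  rw [pvBexpand]
  simp only [List.nil_append]
  rw [pvFoldFlat pvExpandA
    (fun (st : List (List Char) × PySem.Set (List Char)) e =>
        if e ≠ [] ∧ PySem.Set.contains st.2 e = false then (st.1 ++ [e], PySem.Set.add st.2 e)
        else st)]
  have hset : (([], PySem.Set.empty) : List (List Char) × PySem.Set (List Char)) = (([], []) : List (List Char) × PySem.Set (List Char)) := rfl
  rw [hset, pvPairFold]
  exact pvFinal _
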